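-- pv_equiv track=rewrite | github.com/canit0221/code-kata | 프로그래머스/0/181855. 문자열 묶기/문자열 묶기.py | solution
-- ===== SOURCE A (Python) =====
-- def solution(strArr):
--     length_count = {}
--
--     for i in strArr:
--         length = len(i)
--         if length in length_count:
--             length_count[length] += 1
--         else:
--             length_count[length] = 1
--     return max(length_count.values())
-- ===== SOURCE B (Python) =====
-- def solution(strArr):
--     lengths = sorted(len(s) for s in strArr)
--     best = 0
--     run = 0
--     prev = None
--     for L in lengths:
--         run = run + 1 if L == prev else 1
--         prev = L
--         if run > best:
--             best = run
--     return best
-- ===== Notes on version B (the rewrite author's own statement) =====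
-- stated objective: alternative
-- what changed: B replaces the dict-counting pass by sorting the lengths and scanning for the longest run of equal consecutive values, which equals the maximum frequency because sorting groups equal lengths adjacently.
import Mathlib
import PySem

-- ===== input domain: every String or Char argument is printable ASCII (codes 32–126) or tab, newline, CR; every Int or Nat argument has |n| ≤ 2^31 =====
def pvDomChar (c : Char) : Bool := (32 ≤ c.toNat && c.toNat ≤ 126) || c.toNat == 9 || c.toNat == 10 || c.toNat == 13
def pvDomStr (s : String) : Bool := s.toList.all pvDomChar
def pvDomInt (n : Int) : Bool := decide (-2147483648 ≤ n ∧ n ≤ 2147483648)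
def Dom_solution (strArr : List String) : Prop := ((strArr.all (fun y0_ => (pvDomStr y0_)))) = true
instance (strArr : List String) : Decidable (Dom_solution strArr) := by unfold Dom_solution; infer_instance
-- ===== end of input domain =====

-- B sorts the lengths and returns the longest run of equal consecutive values (the max frequency), instead of A's dict counting; on [] A raises where B returns 0.


-- ===== PORT A =====
-- the 'for i in strArr' loop building length_count
def solutionDict (strArr : List String) : PySem.Dict Int Int :=
  strArr.foldl (fun d i =>
    let length : Int := PySem.Str.len i
    if d.contains length then d.insert length (d.getD length 0 + 1)
    else d.insert length 1) PySem.Dict.empty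

def solution (strArr : List String) : Int :=
  -- max(length_count.values()); Python raises ValueError on an empty dict, excluded by Pre_
  match PySem.List.max? (solutionDict strArr).values (fun x => x) with
  | some m => m
  | none => 0

-- ===== PORT B =====
-- one step of the 'for L in lengths' loop; state = (best, run, prev)
def solutionStep (st : Int × Int × Option Int) (L : Int) : Int × Int × Option Int :=
  let run := if st.2.2 = some L then st.2.1 + 1 else 1
  ((if run > st.1 then run else st.1), run, some L)

def solution_alt (strArr : List String) : Int :=
  let lengths := PySem.List.sorted (strArr.map (fun s => (PySem.Str.len s : Int))) (fun x => x) false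
  (lengths.foldl solutionStep (0, 0, none)).1

-- ===== PRECONDITION & SPEC =====
-- Pre_ excludes only the empty list, on which A's max({}.values()) raises ValueError.
def Pre_solution (strArr : List String) : Prop := strArr ≠ []
instance (strArr : List String) : Decidable (Pre_solution strArr) := by unfold Pre_solution; infer_instance
def pvWitness_solution : List String := (["a", "bc", "d"])


def Spec_solution (strArr : List String) (out : Int) : Prop := out = solution_alt strArr
instance (strArr : List String) (out : Int) : Decidable (Spec_solution strArr out) := by unfold Spec_solution; infer_instance

-- ===== CLAIM (what is proved, stated in full; the proofs are below) =====
def Claim_equal_solution : Prop := ∀ (strArr : List String), Dom_solution strArr → Pre_solution strArr → Spec_solution strArr (solution strArr)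

-- ===== LEMMAS AND PROOFS =====

theorem get?_eq_none_of_not_contains {κ ν : Type} [BEq κ] (d : PySem.Dict κ ν) (k : κ)
    (h : d.contains k = false) : d.get? k = none := by
  unfold PySem.Dict.get? PySem.Dict.contains at *
  simp [List.find?_eq_none] at *
  intro p q hp; exact h p q hp

-- A's loop is exactly collections.Counter of the lengths
theorem solutionDict_eq_counter (strArr : List String) :
    solutionDict strArr = PySem.Dict.counter (strArr.map (fun s => (PySem.Str.len s : Int))) := by
  unfold solutionDict
  rw [← PySem.Dict.foldl_insert_getD_add_one_eq_counter, List.foldl_map]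
  apply PySem.List.foldl_congr_mem
  intro d i _
  by_cases h : d.contains (PySem.Str.len i : Int) = true
  · rw [if_pos h]
  · rw [if_neg h, PySem.Dict.getD,
      get?_eq_none_of_not_contains _ _ (Bool.not_eq_true _ ▸ h)]
    norm_num

-- the run-scan invariant: on a ≤-sorted list the fold's best is the maximal element count,
-- its run is the count of the last element, and prev is the last element
theorem solutionStep_invariant (p : List Int) (hs : p.Pairwise (· ≤ ·)) :
    (p.foldl solutionStep (0, 0, none)).2.2 = p.getLast? ∧
    (∀ a, p.getLast? = some a → (p.foldl solutionStep (0, 0, none)).2.1 = (p.count a : Int)) ∧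
    (∀ k ∈ p, (p.count k : Int) ≤ (p.foldl solutionStep (0, 0, none)).1) ∧
    (p ≠ [] → ∃ k ∈ p, (p.count k : Int) = (p.foldl solutionStep (0, 0, none)).1) := by
  induction p using List.reverseRecOn with
  | nil => simp
  | append_singleton q x ih =>
    have hq : q.Pairwise (· ≤ ·) := (List.pairwise_append.mp hs).1
    have hle : ∀ y ∈ q, y ≤ x := by
      intro y hy
      exact (List.pairwise_append.mp hs).2.2 y hy x (by simp)
    obtain ⟨ih1, ih2, ih3, ih4⟩ := ih hq
    rw [List.foldl_append] at *
    simp only [List.foldl_cons, List.foldl_nil]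
    by_cases hqne : q = []
    · subst hqne
      refine ⟨by simp [solutionStep], ?_, ?_, ?_⟩
      · intro a ha
        simp at ha
        subst ha
        simp [solutionStep]
      · intro k hk
        have : k = x := by simpa using hk
        subst this
        simp [solutionStep]
      · exact fun _ => ⟨x, by simp, by simp [solutionStep]⟩
    · obtain ⟨a, ha⟩ : ∃ a, q.getLast? = some a := by
        cases h : q.getLast? with
        | none => exact absurd (List.getLast?_eq_none_iff.mp h) hqne
        | some a => exact ⟨a, rfl⟩
      have haq : a ∈ q := List.mem_of_getLast? ha
      have hax : a ≤ x := hle a haq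
      set st := q.foldl solutionStep (0, 0, none) with hst
      have hprev : st.2.2 = some a := by rw [ih1, ha]
      have hrun : st.2.1 = (q.count a : Int) := ih2 a ha
      by_cases hxa : a = x
      · -- x equals the last run's value: the run extends
        subst hxa
        have hcnt : ((q ++ [a]).count a : Int) = (q.count a : Int) + 1 := by
          simp [List.count_append]
        have hcnt' : ∀ k, k ≠ a → (q ++ [a]).count k = q.count k := by
          intro k hk
          simp [List.count_append, List.count_singleton]
          exact fun h => hk h.symm
        have hstep : solutionStep st a = ((if st.2.1 + 1 > st.1 then st.2.1 + 1 else st.1), st.2.1 + 1, some a) := by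
          simp [solutionStep, hprev]
        rw [hstep]
        refine ⟨List.getLast?_concat.symm, ?_, ?_, ?_⟩
        · intro b hb
          rw [List.getLast?_concat] at hb
          have : b = a := (Option.some.inj hb).symm
          subst this; simp [hrun]
        · intro k hk
          rcases List.mem_append.mp hk with hk' | hk'
          · by_cases hka : k = a
            · subst hka
              rw [hcnt]
              split_ifs with hgt
              · omega
              · rw [hrun] at hgt; omega
            · have := ih3 k hk'
              rw [hcnt' k hka]
              split_ifs with hgt <;> omega
          · have : k = a := by simpa using hk'
            subst this
            rw [hcnt]
            split_ifs with hgt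
            · omega
            · rw [hrun] at hgt; omega
        · intro _
          by_cases h : st.2.1 + 1 > st.1
          · exact ⟨a, by simp, by rw [hcnt, if_pos h, hrun]⟩
          · obtain ⟨k, hk, hkc⟩ := ih4 hqne
            have hka : k ≠ a := by
              intro he; subst he
              omega
            exact ⟨k, List.mem_append_left _ hk,
              by rw [if_neg h, hcnt' k hka]; exact hkc⟩
      · -- x is a new, strictly larger value: it does not occur in q
        have hxq : x ∉ q := by
          intro hx
          -- every element of q is ≤ a since a is the last of a sorted list
          have h2 : x ≤ a := by
            have hsplit := List.dropLast_append_getLast? a ha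
            rcases List.mem_append.mp (hsplit ▸ hx) with h | h
            · exact (List.pairwise_append.mp (hsplit ▸ hq)).2.2 x h a (by simp)
            · simp at h; omega
          exact hxa (le_antisymm hax h2)
        have hcntx : ((q ++ [x]).count x : Int) = 1 := by
          simp [List.count_append, List.count_eq_zero.mpr hxq]
        have hcnt' : ∀ k, k ≠ x → (q ++ [x]).count k = q.count k := by
          intro k hk
          simp [List.count_append, List.count_singleton]
          exact fun h => hk h.symm
        have hprevne : ¬ st.2.2 = some x := by rw [hprev]; simpa using hxa
        have hstep : solutionStep st x = ((if (1 : Int) > st.1 then 1 else st.1), 1, some x) := by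
          simp only [solutionStep, if_neg hprevne]
        rw [hstep]
        have hbest1 : (1 : Int) ≤ st.1 := by
          obtain ⟨k, hk, hkc⟩ := ih4 hqne
          have : 1 ≤ q.count k := List.count_pos_iff.mpr hk
          omega
        have hnotgt : ¬ ((1 : Int) > st.1) := by omega
        refine ⟨List.getLast?_concat.symm, ?_, ?_, ?_⟩
        · intro b hb
          rw [List.getLast?_concat] at hb
          have : b = x := (Option.some.inj hb).symm
          subst this
          simp
          exact List.count_eq_zero.mpr hxq
        · intro k hk
          rw [if_neg hnotgt]
          rcases List.mem_append.mp hk with hk' | hk'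
          · have hka : k ≠ x := by rintro rfl; exact hxq hk'
            rw [hcnt' k hka]; exact ih3 k hk'
          · have : k = x := by simpa using hk'
            subst this; rw [hcntx]; exact hbest1
        · intro _
          obtain ⟨k, hk, hkc⟩ := ih4 hqne
          have hka : k ≠ x := by rintro rfl; exact hxq hk
          exact ⟨k, List.mem_append_left _ hk,
            by rw [if_neg hnotgt, hcnt' k hka]; exact hkc⟩

-- ===== VERDICT (by name: the statement is the Claim_ definition above) =====
theorem solution_spec : Claim_equal_solution := by
  intro strArr _ hpre
  unfold Spec_solution solution solution_alt
  rw [solutionDict_eq_counter]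
  set lengths := strArr.map (fun s => (PySem.Str.len s : Int)) with hl
  set sl := PySem.List.sorted lengths (fun x => x) false with hsl
  have hperm : sl.Perm lengths := PySem.List.sorted_perm ..
  have hpw : sl.Pairwise (· ≤ ·) := by
    have := PySem.List.sorted_pairwise lengths (fun x => x)
    simpa using this
  have hlne : lengths ≠ [] := by
    cases strArr with
    | nil => exact absurd rfl hpre
    | cons a t => simp [hl]
  have hslne : sl ≠ [] := by
    intro h; rw [h] at hperm; exact hlne hperm.nil_eq.symm
  obtain ⟨_, _, h3, h4⟩ := solutionStep_invariant sl hpw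
  set best := (sl.foldl solutionStep (0, 0, none)).1 with hbest
  -- A's values list
  have hvals : (PySem.Dict.counter lengths).values
      = (PySem.Set.ofList lengths).map (fun k => (lengths.count k : Int)) := by
    show (PySem.Dict.counter _).items.map _ = _
    rw [PySem.Dict.items_counter, List.map_map]
    rfl
  rw [hvals]
  -- the values list is nonempty, so max? = some m
  obtain ⟨k0, hk0m, hk0⟩ := h4 hslne
  have hk0len : k0 ∈ lengths := hperm.mem_iff.mp hk0m
  have hk0set : k0 ∈ PySem.Set.ofList lengths := (PySem.Set.mem_ofList _ _).mpr hk0len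
  have hbmem : best ∈ (PySem.Set.ofList lengths).map (fun k => (lengths.count k : Int)) := by
    refine List.mem_map.mpr ⟨k0, hk0set, ?_⟩
    rw [← hk0, hperm.count_eq]
  obtain ⟨m, hm⟩ : ∃ m, PySem.List.max? ((PySem.Set.ofList lengths).map
      (fun k => (lengths.count k : Int))) (fun x => x) = some m := by
    cases e : PySem.List.max? ((PySem.Set.ofList lengths).map
        (fun k => (lengths.count k : Int))) (fun x => x) with
    | none =>
      have := (PySem.List.max?_eq_none_iff _ _).mp e
      rw [this] at hbmem; exact absurd hbmem (by simp)
    | some m => exact ⟨m, rfl⟩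
  rw [hm]
  -- m ≤ best (m is a count of some key) and best ≤ m (best is a value, m is max)
  have hmmem := PySem.List.max?_mem hm
  obtain ⟨k1, hk1, hk1e⟩ := List.mem_map.mp hmmem
  have hk1len : k1 ∈ lengths := (PySem.Set.mem_ofList _ _).mp hk1
  have hmle : m ≤ best := by
    rw [← hk1e, ← hperm.count_eq]
    exact h3 k1 (hperm.mem_iff.mpr hk1len)
  have hbm : best ≤ m := by
    have := PySem.List.max?_isMax hm best hbmem
    simpa using this
  exact le_antisymm hmle hbm
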